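-- pv_equiv track=rewrite | github.com/boyobob/OdinsList | OdinsList.py | normalize_publisher
-- ===== SOURCE A (Python) =====
-- def normalize_publisher(publisher: str) -> str:
--     """Normalize common publisher name variants to canonical short forms."""
--     if not publisher:
--         return ""
--     pub_lower = publisher.strip().lower()
--     aliases = {
--         "Marvel": ["marvel", "marvel comics", "marvel comics group"],
--         "DC": ["dc", "dc comics", "d.c. comics"],
--         "Image": ["image", "image comics"],
--         "Dark Horse": ["dark horse", "dark horse comics"],
--         "IDW": ["idw", "idw publishing"],
--         "Valiant": ["valiant", "valiant comics"],
--         "Archie": ["archie", "archie comics", "archie comic publications"],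
--     }
--     for canonical, variants in aliases.items():
--         if pub_lower in variants:
--             return canonical
--     return publisher.strip()
-- ===== SOURCE B (Python) =====
-- # Flat list of (variant, canonical) pairs, sorted by variant (ASCII order),
-- # searched by hand-written binary search instead of scanning the alias table.
-- _PAIRS = (
--     ("archie", "Archie"),
--     ("archie comic publications", "Archie"),
--     ("archie comics", "Archie"),
--     ("d.c. comics", "DC"),
--     ("dark horse", "Dark Horse"),
--     ("dark horse comics", "Dark Horse"),
--     ("dc", "DC"),
--     ("dc comics", "DC"),
--     ("idw", "IDW"),
--     ("idw publishing", "IDW"),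
--     ("image", "Image"),
--     ("image comics", "Image"),
--     ("marvel", "Marvel"),
--     ("marvel comics", "Marvel"),
--     ("marvel comics group", "Marvel"),
--     ("valiant", "Valiant"),
--     ("valiant comics", "Valiant"),
-- )
--
-- def normalize_publisher(publisher: str) -> str:
--     """Normalize common publisher name variants to canonical short forms."""
--     if not publisher:
--         return ""
--     s = publisher.strip()
--     t = s.lower()
--     lo, hi = 0, len(_PAIRS)
--     while lo < hi:
--         mid = (lo + hi) // 2
--         key, canon = _PAIRS[mid]
--         if key == t:
--             return canon
--         if key < t:
--             lo = mid + 1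
--         else:
--             hi = mid
--     return s
-- ===== Notes on version B (the rewrite author's own statement) =====
-- stated objective: alternative
-- what changed: Replaces A's linear scan over the alias dict's variant lists with a hand-written binary search over a single flat list of (variant, canonical) pairs pre-sorted by variant, driven by string-order comparisons instead of membership tests.
import Mathlib
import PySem

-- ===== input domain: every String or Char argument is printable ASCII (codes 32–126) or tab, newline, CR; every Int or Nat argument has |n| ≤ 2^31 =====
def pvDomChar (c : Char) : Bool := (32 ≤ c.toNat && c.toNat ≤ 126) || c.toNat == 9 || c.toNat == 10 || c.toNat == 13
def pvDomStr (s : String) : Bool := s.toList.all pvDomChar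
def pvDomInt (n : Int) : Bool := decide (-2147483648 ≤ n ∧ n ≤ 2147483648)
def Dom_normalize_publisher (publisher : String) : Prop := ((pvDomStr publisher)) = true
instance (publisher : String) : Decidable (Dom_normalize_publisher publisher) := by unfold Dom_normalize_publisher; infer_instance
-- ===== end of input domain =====

-- B replaces A's linear scan over the alias table's variant lists by a
-- hand-written binary search on a flat (variant, canonical) list sorted by
-- variant; objective: alternative.

-- ===== PORT A =====
-- A's literal alias dict
def pvAliasesA : PySem.Dict String (List String) := PySem.Dict.ofList
  [ ("Marvel", ["marvel", "marvel comics", "marvel comics group"])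
  , ("DC", ["dc", "dc comics", "d.c. comics"])
  , ("Image", ["image", "image comics"])
  , ("Dark Horse", ["dark horse", "dark horse comics"])
  , ("IDW", ["idw", "idw publishing"])
  , ("Valiant", ["valiant", "valiant comics"])
  , ("Archie", ["archie", "archie comics", "archie comic publications"]) ]

-- the 'for canonical, variants in aliases.items(): if pub_lower in variants: return canonical' loop
def pvLoopA (items : List (String × List String)) (pub_lower stripped : String) : String :=
  match items with
  | [] => stripped
  | (canonical, variants) :: rest =>
    if variants.contains pub_lower then canonical else pvLoopA rest pub_lower stripped

def normalize_publisher (publisher : String) : String :=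
  if publisher = "" then ""
  else
    let pub_lower := PySem.Str.lower (PySem.Str.strip publisher)
    pvLoopA pvAliasesA.items pub_lower (PySem.Str.strip publisher)

-- ===== PORT B =====
-- Source B's _PAIRS: (variant, canonical) pairs sorted by variant
def pvPairsB : List (String × String) :=
  [ ("archie", "Archie")
  , ("archie comic publications", "Archie")
  , ("archie comics", "Archie")
  , ("d.c. comics", "DC")
  , ("dark horse", "Dark Horse")
  , ("dark horse comics", "Dark Horse")
  , ("dc", "DC")
  , ("dc comics", "DC")
  , ("idw", "IDW")
  , ("idw publishing", "IDW")
  , ("image", "Image")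
  , ("image comics", "Image")
  , ("marvel", "Marvel")
  , ("marvel comics", "Marvel")
  , ("marvel comics group", "Marvel")
  , ("valiant", "Valiant")
  , ("valiant comics", "Valiant") ]

-- Source B's 'while lo < hi' binary-search loop (lo, hi stay nonnegative ints, so Nat;
-- Python's (lo+hi)//2 on nonnegative ints is Nat division — exact)
def pvBsearchB (t s : String) (lo hi : Nat) : String :=
  if _h : lo < hi then
    let mid := (lo + hi) / 2
    let kc := pvPairsB.getD mid ("", "")
    if kc.1 = t then kc.2
    else if kc.1 < t then pvBsearchB t s (mid + 1) hi
    else pvBsearchB t s lo mid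
  else s
termination_by hi - lo
decreasing_by all_goals omega

def normalize_publisher_alt (publisher : String) : String :=
  if publisher = "" then ""
  else
    let s := PySem.Str.strip publisher
    let t := PySem.Str.lower s
    pvBsearchB t s 0 pvPairsB.length

-- ===== PRECONDITION & SPEC =====
def Spec_normalize_publisher (publisher : String) (out : String) : Prop := out = normalize_publisher_alt publisher
instance (publisher : String) (out : String) : Decidable (Spec_normalize_publisher publisher out) := by unfold Spec_normalize_publisher; infer_instance

-- ===== CLAIM (what is proved, stated in full; the proofs are below) =====
def Claim_equal_normalize_publisher : Prop := ∀ (publisher : String), Dom_normalize_publisher publisher → Spec_normalize_publisher publisher (normalize_publisher publisher)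

-- ===== LEMMAS AND PROOFS =====
-- the first-match lookup B's binary search implements
def pvFind (t s : String) : String := ((pvPairsB.find? (fun kc => kc.1 == t)).map (·.2)).getD s

-- the pair list is strictly sorted by variant
theorem pvSorted (i j : Nat) (hij : i < j) (hj : j < pvPairsB.length) :
    (pvPairsB.getD i ("", "")).1 < (pvPairsB.getD j ("", "")).1 := by
  have hp' : List.Pairwise (fun a b : String × String => a.1.toList < b.1.toList) pvPairsB := by decide
  have hp : List.Pairwise (fun a b : String × String => a.1 < b.1) pvPairsB :=
    hp'.imp (fun h => String.lt_iff_toList_lt.mpr h)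
  rw [List.getD_eq_getElem _ _ (by omega), List.getD_eq_getElem _ _ hj]
  exact List.pairwise_iff_getElem.mp hp i j (by omega) hj hij

-- if no key equals t, the lookup falls back to s
theorem pvFind_none (t s : String)
    (h : ∀ i, i < pvPairsB.length → (pvPairsB.getD i ("", "")).1 ≠ t) : pvFind t s = s := by
  unfold pvFind
  rw [List.find?_eq_none.mpr ?_]
  · rfl
  · intro x hx
    obtain ⟨i, hilen, hxeq⟩ := List.mem_iff_getElem.mp hx
    have := h i hilen
    rw [List.getD_eq_getElem _ _ hilen, hxeq] at this
    simpa using this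

-- binary-search invariant: every index whose key is t lies in [lo, hi)
theorem pvBsearch_correct (t s : String) (n : Nat) : ∀ (lo hi : Nat), hi - lo ≤ n →
    hi ≤ pvPairsB.length →
    (∀ i, i < pvPairsB.length → ((pvPairsB.getD i ("", "")).1 = t → lo ≤ i ∧ i < hi)) →
    pvBsearchB t s lo hi = pvFind t s := by
  induction n with
  | zero =>
    intro lo hi h1 h2 h3
    rw [pvBsearchB, dif_neg (by omega)]
    exact (pvFind_none t s (fun i hi0 hkey => by have := h3 i hi0 hkey; omega)).symm
  | succ n ih =>
    intro lo hi h1 h2 h3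
    by_cases hlt : lo < hi
    · rw [pvBsearchB, dif_pos hlt]
      have hmidlt : (lo + hi) / 2 < pvPairsB.length := by omega
      rcases lt_trichotomy (pvPairsB.getD ((lo + hi) / 2) ("", "")).1 t with hk | hk | hk
      · rw [if_neg (ne_of_lt hk), if_pos hk]
        apply ih
        · omega
        · exact h2
        · intro i hi0 hkey
          refine ⟨?_, (h3 i hi0 hkey).2⟩
          by_contra hni
          rcases Nat.lt_or_ge i ((lo + hi) / 2) with hl | hg
          · have hs := pvSorted i ((lo + hi) / 2) hl hmidlt
            rw [hkey] at hs
            exact absurd (lt_trans hs hk) (lt_irrefl _)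
          · have : i = (lo + hi) / 2 := by omega
            rw [this] at hkey
            exact absurd hkey (ne_of_lt hk)
      · rw [if_pos hk]
        have hk' := hk
        rw [List.getD_eq_getElem _ _ hmidlt] at hk'
        have hf : pvPairsB.find? (fun kc => kc.1 == t) = some (pvPairsB[(lo + hi) / 2]'hmidlt) := by
          refine List.find?_eq_some_iff_getElem.mpr ⟨by simpa using hk', (lo + hi) / 2, hmidlt, rfl, ?_⟩
          intro j hj
          have hs := pvSorted j ((lo + hi) / 2) hj hmidlt
          rw [List.getD_eq_getElem _ _ (by omega), List.getD_eq_getElem _ _ hmidlt] at hs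
          simp only [Bool.not_eq_eq_eq_not, Bool.not_true, beq_eq_false_iff_ne, ne_eq]
          intro hje
          rw [hje, hk'] at hs
          exact lt_irrefl t hs
        unfold pvFind
        rw [hf, List.getD_eq_getElem _ _ hmidlt]
        rfl
      · rw [if_neg (by intro he; rw [he] at hk; exact lt_irrefl t hk), if_neg (by exact not_lt_of_gt hk)]
        apply ih
        · omega
        · omega
        · intro i hi0 hkey
          refine ⟨(h3 i hi0 hkey).1, ?_⟩
          by_contra hni
          rcases Nat.lt_or_ge ((lo + hi) / 2) i with hl | hg
          · have hs := pvSorted ((lo + hi) / 2) i hl hi0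
            rw [hkey] at hs
            exact absurd (lt_trans hk hs) (lt_irrefl _)
          · have : i = (lo + hi) / 2 := by omega
            rw [this] at hkey
            rw [hkey] at hk
            exact absurd hk (lt_irrefl _)
    · rw [pvBsearchB, dif_neg hlt]
      exact (pvFind_none t s (fun i hi0 hkey => by have := h3 i hi0 hkey; omega)).symm

-- A's items as a literal list
theorem pvItemsLit : pvAliasesA.items =
  [ ("Marvel", ["marvel", "marvel comics", "marvel comics group"])
  , ("DC", ["dc", "dc comics", "d.c. comics"])
  , ("Image", ["image", "image comics"])
  , ("Dark Horse", ["dark horse", "dark horse comics"])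
  , ("IDW", ["idw", "idw publishing"])
  , ("Valiant", ["valiant", "valiant comics"])
  , ("Archie", ["archie", "archie comics", "archie comic publications"]) ] := by decide

-- when pub_lower is none of the 17 variants, A's scan falls through to stripped
theorem pvNoKeyA (t s : String) (h0 : ¬ (t = "marvel")) (h1 : ¬ (t = "marvel comics")) (h2 : ¬ (t = "marvel comics group")) (h3 : ¬ (t = "dc")) (h4 : ¬ (t = "dc comics")) (h5 : ¬ (t = "d.c. comics")) (h6 : ¬ (t = "image")) (h7 : ¬ (t = "image comics")) (h8 : ¬ (t = "dark horse")) (h9 : ¬ (t = "dark horse comics")) (h10 : ¬ (t = "idw")) (h11 : ¬ (t = "idw publishing")) (h12 : ¬ (t = "valiant")) (h13 : ¬ (t = "valiant comics")) (h14 : ¬ (t = "archie")) (h15 : ¬ (t = "archie comics")) (h16 : ¬ (t = "archie comic publications")) : pvLoopA pvAliasesA.items t s = s := by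
  rw [pvItemsLit]
  simp only [pvLoopA]
  simp only [List.contains_cons, List.contains_nil, beq_iff_eq, Bool.or_eq_true, Bool.false_eq_true, or_false]
  rw [if_neg (by rintro (hh|hh|hh) <;> first | exact h0 hh | exact h1 hh | exact h2 hh)]
  rw [if_neg (by rintro (hh|hh|hh) <;> first | exact h3 hh | exact h4 hh | exact h5 hh)]
  rw [if_neg (by rintro (hh|hh) <;> first | exact h6 hh | exact h7 hh)]
  rw [if_neg (by rintro (hh|hh) <;> first | exact h8 hh | exact h9 hh)]
  rw [if_neg (by rintro (hh|hh) <;> first | exact h10 hh | exact h11 hh)]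
  rw [if_neg (by rintro (hh|hh) <;> first | exact h12 hh | exact h13 hh)]
  rw [if_neg (by rintro (hh|hh|hh) <;> first | exact h14 hh | exact h15 hh | exact h16 hh)]

-- link A's scan to the lookup, per possible pub_lower
theorem pvKey (t s : String) : pvLoopA pvAliasesA.items t s = pvBsearchB t s 0 pvPairsB.length := by
  rw [pvBsearch_correct t s pvPairsB.length 0 pvPairsB.length (by omega) (le_refl _)
      (fun i hi0 _ => ⟨Nat.zero_le _, hi0⟩)]
  by_cases h0 : t = "marvel"
  · subst h0; rfl
  by_cases h1 : t = "marvel comics"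
  · subst h1; rfl
  by_cases h2 : t = "marvel comics group"
  · subst h2; rfl
  by_cases h3 : t = "dc"
  · subst h3; rfl
  by_cases h4 : t = "dc comics"
  · subst h4; rfl
  by_cases h5 : t = "d.c. comics"
  · subst h5; rfl
  by_cases h6 : t = "image"
  · subst h6; rfl
  by_cases h7 : t = "image comics"
  · subst h7; rfl
  by_cases h8 : t = "dark horse"
  · subst h8; rfl
  by_cases h9 : t = "dark horse comics"
  · subst h9; rfl
  by_cases h10 : t = "idw"
  · subst h10; rfl
  by_cases h11 : t = "idw publishing"
  · subst h11; rfl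
  by_cases h12 : t = "valiant"
  · subst h12; rfl
  by_cases h13 : t = "valiant comics"
  · subst h13; rfl
  by_cases h14 : t = "archie"
  · subst h14; rfl
  by_cases h15 : t = "archie comics"
  · subst h15; rfl
  by_cases h16 : t = "archie comic publications"
  · subst h16; rfl
  rw [pvFind_none t s ?_]
  · exact pvNoKeyA t s h0 h1 h2 h3 h4 h5 h6 h7 h8 h9 h10 h11 h12 h13 h14 h15 h16
  · intro i hi0
    have hi17 : i < 17 := by simpa [pvPairsB] using hi0
    clear hi0
    interval_cases i <;> first | exact fun hh => h0 hh.symm | exact fun hh => h1 hh.symm | exact fun hh => h2 hh.symm | exact fun hh => h3 hh.symm | exact fun hh => h4 hh.symm | exact fun hh => h5 hh.symm | exact fun hh => h6 hh.symm | exact fun hh => h7 hh.symm | exact fun hh => h8 hh.symm | exact fun hh => h9 hh.symm | exact fun hh => h10 hh.symm | exact fun hh => h11 hh.symm | exact fun hh => h12 hh.symm | exact fun hh => h13 hh.symm | exact fun hh => h14 hh.symm | exact fun hh => h15 hh.symm | exact fun hh => h16 hh.symm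

-- ===== VERDICT (by name: the statement is the Claim_ definition above) =====
theorem normalize_publisher_spec : Claim_equal_normalize_publisher := by
  intro publisher _
  unfold Spec_normalize_publisher normalize_publisher normalize_publisher_alt
  by_cases h : publisher = ""
  · simp [h]
  · simp only [if_neg h]
    exact pvKey _ _
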